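-- pv_equiv track=rewrite | github.com/Naolt/Competitive-Programming | get-maximum-in-generated-array.py | bu
-- ===== SOURCE A (Python) =====
-- def bu(n):
--     if n == 0:
--         return 0
--     if n == 1:
--         return 1
--     nums = [0]*(n+1)
--     nums[1] = 1
--
--     for i in range(1,n+1):
--         if i*2 <= n:
--             nums[i*2] += nums[i]
--         if i*2+1 <= n:
--             nums[i*2+1] = nums[i]+nums[i+1]
--
--     return max(nums)
-- ===== SOURCE B (Python) =====
-- def bu(n):
--     # each entry of the generated array is Stern's diatomic sequence fusc(i),
--     # computable directly from the binary digits of i with two accumulators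
--     def fusc(i):
--         a, b = 1, 0
--         while i:
--             if i % 2 == 1:
--                 b += a
--             else:
--                 a += b
--             i //= 2
--         return b
--
--     return max(fusc(i) for i in range(n + 1))
-- ===== Notes on version B (the rewrite author's own statement) =====
-- stated objective: alternative
-- what changed: B drops A's DP table entirely: it recognises the generated array as Stern's diatomic sequence and computes each entry independently from the binary digits of its index with a two-accumulator bit loop (fusc), taking the max of a generator; no array is allocated and no entry is derived from other entries.
import Mathlib
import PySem

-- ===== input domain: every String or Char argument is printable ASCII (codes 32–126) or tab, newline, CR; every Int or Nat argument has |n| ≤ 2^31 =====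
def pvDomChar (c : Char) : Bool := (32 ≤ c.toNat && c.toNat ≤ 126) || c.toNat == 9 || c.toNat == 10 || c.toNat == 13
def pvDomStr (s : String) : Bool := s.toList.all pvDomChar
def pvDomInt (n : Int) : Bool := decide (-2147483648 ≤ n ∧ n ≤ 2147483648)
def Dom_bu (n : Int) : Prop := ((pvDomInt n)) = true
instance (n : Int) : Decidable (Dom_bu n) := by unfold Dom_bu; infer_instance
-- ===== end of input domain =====

-- B replaces A's DP table by a table-free computation: every entry of the generated array is
-- Stern's diatomic sequence fusc(i), computed independently per index from the binary digits of i
-- with a two-accumulator loop; B returns the max of these values (a different algorithm, not claimed faster).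

-- The Python list nums of A is ported as Array Int (hand port, needed so the port evaluates in
-- linear time); every index A reads or writes is a non-negative in-range index on the admitted
-- inputs, where aGet/aSet are exactly Python's nums[i] read/assignment (out of range: unreached).
def aGet (xs : Array Int) (i : Int) : Int :=
  if h : 0 ≤ i ∧ i.toNat < xs.size then xs[i.toNat]'h.2 else 0
def aSet (xs : Array Int) (i : Int) (v : Int) : Array Int :=
  if h : 0 ≤ i ∧ i.toNat < xs.size then xs.set i.toNat v h.2 else xs

-- ===== PORT A =====
-- loop body of A: push nums[i] forward into the children 2i and 2i+1 (guarded writes, += on 2i)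
def stepA (n : Int) (nums : Array Int) (i : Int) : Array Int :=
  let nums := if i * 2 ≤ n then
      aSet nums (i * 2) (aGet nums (i * 2) + aGet nums i)
    else nums
  if i * 2 + 1 ≤ n then
    aSet nums (i * 2 + 1) (aGet nums i + aGet nums (i + 1))
  else nums

-- literal transliteration of A: nums = [0]*(n+1); nums[1] = 1; for i in range(1,n+1): …; max(nums)
def bu (n : Int) : Int :=
  if n = 0 then 0
  else if n = 1 then 1
  else
    let nums := (List.replicate (n + 1).toNat (0 : Int)).toArray
    let nums := aSet nums 1 1          -- nums[1] = 1 (IndexError for n < 0: outside Pre_)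
    let nums := (PySem.List.pyRange 1 (n + 1) 1).foldl (stepA n) nums
    (PySem.List.max? nums.toList (fun x => x)).getD 0

-- ===== PORT B =====
-- the while loop of fusc: a, b = 1, 0; while i: if i%2==1: b+=a else: a+=b; i//=2; return b
-- exact for i ≥ 0 (the only calls B makes); Python diverges on i < 0, where this returns b (unreached)
def fuscGo (i a b : Int) : Int :=
  if i ≤ 0 then b
  else if PySem.Int.mod i 2 = 1 then fuscGo (PySem.Int.floordiv i 2) a (b + a)
  else fuscGo (PySem.Int.floordiv i 2) (a + b) b
termination_by i.toNat
decreasing_by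
  all_goals
    rw [PySem.Int.floordiv_eq_ediv_of_pos (by omega : (0:Int) < 2)]
    omega

-- literal transliteration of B: max(fusc(i) for i in range(n+1))
-- (max of an empty generator = ValueError for n < 0: outside Pre_, the .getD 0 is unreached)
def bu_alt (n : Int) : Int :=
  (PySem.List.max? ((PySem.List.pyRange 0 (n + 1) 1).map (fun i => fuscGo i 1 0)) (fun x => x)).getD 0

-- ===== PRECONDITION & SPEC =====
-- A raises IndexError at nums[1] = 1 for every n < 0 ([0]*(n+1) is empty there,
-- and B's max() over an empty generator raises ValueError there too); Pre_ excludes n < 0.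
def Pre_bu (n : Int) : Prop := 0 ≤ n
instance (n : Int) : Decidable (Pre_bu n) := by unfold Pre_bu; infer_instance
def pvWitness_bu : Int := 5
def Spec_bu (n : Int) (out : Int) : Prop := out = bu_alt n
instance (n : Int) (out : Int) : Decidable (Spec_bu n out) := by unfold Spec_bu; infer_instance

-- ===== CLAIM (what is proved, stated in full; the proofs are below) =====
def Claim_equal_bu : Prop := ∀ (n : Int), Dom_bu n → Pre_bu n → Spec_bu n (bu n)

-- ===== LEMMAS AND PROOFS =====

-- the shared characterisation: entry i of the generated array (Stern's diatomic sequence)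
def fRec : Nat → Int
  | 0 => 0
  | 1 => 1
  | (k+2) =>
      if h : (k + 2) % 2 = 0 then fRec ((k + 2) / 2)
      else fRec ((k + 2) / 2) + fRec ((k + 2) / 2 + 1)
decreasing_by
  · omega
  · omega
  · omega

-- A's intermediate array: entries up to threshold tr already carry fRec, the rest are still 0
def mkA (N : Nat) (tr : Int) : List Int :=
  (List.range (N+1)).map (fun (j : Nat) => if (j:Int) ≤ tr then fRec j else 0)

lemma fRec_ge2 (m : Nat) (h : 2 ≤ m) :
    fRec m = if m % 2 = 0 then fRec (m / 2) else fRec (m / 2) + fRec (m / 2 + 1) := by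
  obtain ⟨k, rfl⟩ : ∃ k, m = k + 2 := ⟨m - 2, by omega⟩
  rw [fRec]
  split_ifs with h1 <;> rfl

lemma fRec_even (i : Int) (h : 1 ≤ i) : fRec (i*2).toNat = fRec i.toNat := by
  rw [fRec_ge2 (i*2).toNat (by omega)]
  have h2 : (i*2).toNat % 2 = 0 := by omega
  have h3 : (i*2).toNat / 2 = i.toNat := by omega
  simp [h2, h3]

lemma fRec_odd (i : Int) (h : 1 ≤ i) : fRec (i*2+1).toNat = fRec i.toNat + fRec (i+1).toNat := by
  rw [fRec_ge2 (i*2+1).toNat (by omega)]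
  have h2 : (i*2+1).toNat % 2 = 1 := by omega
  have h3 : (i*2+1).toNat / 2 = i.toNat := by omega
  have h4 : i.toNat + 1 = (i+1).toNat := by omega
  simp [h2, h3, h4]

lemma length_mkA (N : Nat) (tr : Int) : (mkA N tr).length = N + 1 := by simp [mkA]

lemma get_mkA (N : Nat) (tr i : Int) (h0 : 0 ≤ i) (hle : i ≤ (N:Int)) :
    aGet (mkA N tr).toArray i = if i ≤ tr then fRec i.toNat else 0 := by
  unfold aGet
  rw [dif_pos ⟨h0, by simp only [List.size_toArray, length_mkA]; omega⟩]
  simp only [List.getElem_toArray, mkA, List.getElem_map, List.getElem_range]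
  have : ((i.toNat : Nat) : Int) = i := by omega
  rw [this]

lemma set_mkA (N : Nat) (tr i : Int) (v : Int) (h0 : 0 ≤ i) (_h1 : i ≤ (N:Int)) :
    aSet (mkA N tr).toArray i v
      = ((List.range (N+1)).map (fun (j : Nat) => if (j:Int) = i then v else if (j:Int) ≤ tr then fRec j else 0)).toArray := by
  unfold aSet
  rw [dif_pos ⟨h0, by simp only [List.size_toArray, length_mkA]; omega⟩]
  rw [List.set_toArray]
  congr 1
  apply List.ext_getElem
  · simp [mkA]
  · intro j hj hj'
    simp only [mkA, List.getElem_set, List.getElem_map, List.getElem_range]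
    by_cases hji : j = i.toNat
    · have hji' : ((i.toNat:Nat):Int) = i := by omega
      simp [hji, hji']
    · have hji' : ¬ ((j:Nat):Int) = i := by omega
      rw [if_neg (fun h => hji (by omega)), if_neg hji']

lemma mkA_congr (N : Nat) (t1 t2 : Int)
    (h : ∀ j : Nat, j < N + 1 → (((j:Int) ≤ t1) ↔ ((j:Int) ≤ t2))) : mkA N t1 = mkA N t2 := by
  unfold mkA
  apply List.map_congr_left
  intro j hj
  rw [List.mem_range] at hj
  by_cases hc : (j:Int) ≤ t1
  · rw [if_pos hc, if_pos ((h j hj).mp hc)]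
  · rw [if_neg hc, if_neg (fun hc2 => hc ((h j hj).mpr hc2))]

-- one iteration of A's loop extends the correct prefix from 2i-1 to 2i+1 (both capped at n)
lemma stepA_eq (n : Int) (hn : 2 ≤ n) (i : Int) (h1 : 1 ≤ i) (h2 : i ≤ n) :
    stepA n (mkA n.toNat (min (2*i-1) n)).toArray i = (mkA n.toNat (min (2*i+1) n)).toArray := by
  have hNn : ((n.toNat : Nat) : Int) = n := by omega
  unfold stepA
  by_cases hA : i * 2 ≤ n
  · have hmin : min (2*i-1) n = 2*i-1 := by omega
    rw [hmin]
    simp only [if_pos hA]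
    rw [get_mkA n.toNat (2*i-1) (i*2) (by omega) (by omega),
        get_mkA n.toNat (2*i-1) i (by omega) (by omega)]
    rw [if_neg (show ¬ (i*2 ≤ 2*i-1) by omega), if_pos (show i ≤ 2*i-1 by omega)]
    rw [set_mkA n.toNat (2*i-1) (i*2) _ (by omega) (by omega)]
    have hmid : (List.range (n.toNat+1)).map
        (fun (j : Nat) => if (j:Int) = i*2 then 0 + fRec i.toNat else if (j:Int) ≤ 2*i-1 then fRec j else 0)
        = mkA n.toNat (2*i) := by
      unfold mkA
      apply List.map_congr_left
      intro j hj
      rw [List.mem_range] at hj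
      by_cases hji : (j:Int) = i*2
      · rw [if_pos hji, if_pos (by omega)]
        have : j = (i*2).toNat := by omega
        rw [this, fRec_even i h1]
        ring
      · rw [if_neg hji]
        by_cases hle : (j:Int) ≤ 2*i-1
        · rw [if_pos hle, if_pos (by omega)]
        · rw [if_neg hle, if_neg (by omega)]
    rw [hmid]
    by_cases hB : i * 2 + 1 ≤ n
    · rw [if_pos hB]
      rw [get_mkA n.toNat (2*i) i (by omega) (by omega),
          get_mkA n.toNat (2*i) (i+1) (by omega) (by omega)]
      rw [if_pos (show i ≤ 2*i by omega), if_pos (show i+1 ≤ 2*i by omega)]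
      rw [set_mkA n.toNat (2*i) (i*2+1) _ (by omega) (by omega)]
      have hmin2 : min (2*i+1) n = 2*i+1 := by omega
      rw [hmin2]
      unfold mkA
      congr 1
      apply List.map_congr_left
      intro j hj
      rw [List.mem_range] at hj
      by_cases hji : (j:Int) = i*2+1
      · rw [if_pos hji, if_pos (by omega)]
        have : j = (i*2+1).toNat := by omega
        rw [this, fRec_odd i h1]
      · rw [if_neg hji]
        by_cases hle : (j:Int) ≤ 2*i
        · rw [if_pos hle, if_pos (by omega)]
        · rw [if_neg hle, if_neg (by omega)]
    · rw [if_neg hB]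
      exact congrArg List.toArray (mkA_congr _ _ _ (fun j hj => by omega))
  · rw [if_neg hA, if_neg (by omega)]
    exact congrArg List.toArray (mkA_congr _ _ _ (fun j hj => by omega))

lemma foldA (n : Int) (hn : 2 ≤ n) (t : Nat) (ht : (t:Int) ≤ n) :
    (PySem.List.pyRange 1 (1+(t:Int)) 1).foldl (stepA n) (mkA n.toNat 1).toArray
      = (mkA n.toNat (min (2*(1+(t:Int))-1) n)).toArray := by
  induction t with
  | zero =>
      rw [PySem.List.pyRange_one_eq_nil (by omega)]
      simp only [List.foldl_nil]
      exact congrArg List.toArray (mkA_congr _ _ _ (fun j hj => by omega))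
  | succ t ih =>
      have hstep : (1:Int) + (((t:Nat)+1 : Nat) : Int) = (1 + (t:Int)) + 1 := by push_cast; ring
      rw [hstep, PySem.List.pyRange_one_succ_right (by omega), List.foldl_append]
      rw [ih (by omega)]
      simp only [List.foldl_cons, List.foldl_nil]
      rw [stepA_eq n hn (1+(t:Int)) (by omega) (by omega)]
      exact congrArg List.toArray (mkA_congr _ _ _ (fun j hj => by omega))

lemma mkA_full (N : Nat) (tr : Int) (h : (N:Int) ≤ tr) :
    mkA N tr = (List.range (N+1)).map fRec := by
  unfold mkA
  apply List.map_congr_left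
  intro j hj
  rw [List.mem_range] at hj
  rw [if_pos (by omega)]

lemma init_mkA (n : Int) (hn : 2 ≤ n) :
    aSet (List.replicate (n+1).toNat (0:Int)).toArray 1 1 = (mkA n.toNat 1).toArray := by
  unfold aSet
  rw [dif_pos ⟨by omega, by simp only [List.size_toArray, List.length_replicate]; omega⟩]
  rw [List.set_toArray]
  congr 1
  apply List.ext_getElem
  · simp [mkA]; omega
  · intro j hj hj'
    simp only [List.getElem_set, List.getElem_replicate, mkA, List.getElem_map, List.getElem_range]
    match j with
    | 0 => simp [fRec]
    | 1 => simp [fRec]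
    | (k+2) =>
        rw [if_neg (by omega), if_neg (by push_cast; omega)]

lemma bu_eq (n : Int) (hn : 2 ≤ n) :
    bu n = (PySem.List.max? ((List.range (n.toNat+1)).map fRec) (fun x => x)).getD 0 := by
  rw [bu, if_neg (by omega), if_neg (by omega)]
  dsimp only
  rw [init_mkA n hn]
  have hup : n + 1 = 1 + ((n.toNat : Nat) : Int) := by omega
  rw [hup, foldA n hn n.toNat (by omega)]
  rw [mkA_full _ _ (by omega)]

-- B-side recurrence lemmas in Nat form
lemma fRec_double (m : Nat) (h : 1 ≤ m) : fRec (2*m) = fRec m := by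
  rw [fRec_ge2 (2*m) (by omega)]
  have h2 : (2*m) % 2 = 0 := by omega
  have h3 : (2*m) / 2 = m := by omega
  simp [h2, h3]

lemma fRec_double_add_one (m : Nat) : fRec (2*m+1) = fRec m + fRec (m+1) := by
  match m with
  | 0 => simp [fRec]
  | (k+1) =>
      rw [fRec_ge2 (2*(k+1)+1) (by omega)]
      have h2 : (2*(k+1)+1) % 2 = 1 := by omega
      have h3 : (2*(k+1)+1) / 2 = k+1 := by omega
      simp [h2, h3]

-- invariant of fusc's bit loop: fuscGo i a b = a·fRec i + b·fRec (i+1) for i ≥ 0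
lemma fuscGo_eq (k : Nat) : ∀ a b : Int, fuscGo (k:Int) a b = a * fRec k + b * fRec (k+1) := by
  induction k using Nat.strong_induction_on with
  | _ k ih =>
    intro a b
    rw [fuscGo]
    by_cases h0 : (k:Int) ≤ 0
    · have : k = 0 := by omega
      subst this
      simp [fRec]
    · rw [if_neg h0]
      have hflr : PySem.Int.floordiv (k:Int) 2 = ((k/2 : Nat) : Int) :=
        PySem.Int.floordiv_natCast k 2
      have hmod : PySem.Int.mod (k:Int) 2 = ((k%2 : Nat) : Int) :=
        PySem.Int.mod_natCast k 2
      by_cases hpar : k % 2 = 1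
      · rw [if_pos (by rw [hmod, hpar]; rfl)]
        rw [hflr, ih (k/2) (by omega)]
        obtain ⟨m, rfl⟩ : ∃ m, k = 2*m+1 := ⟨k/2, by omega⟩
        have hm : (2*m+1)/2 = m := by omega
        rw [hm, fRec_double_add_one m,
            show 2*m+1+1 = 2*(m+1) by ring, fRec_double (m+1) (by omega)]
        ring
      · rw [if_neg (by rw [hmod]; omega)]
        rw [hflr, ih (k/2) (by omega)]
        obtain ⟨m, rfl⟩ : ∃ m, k = 2*m := ⟨k/2, by omega⟩
        have hm : (2*m)/2 = m := by omega
        rw [hm, fRec_double m (by omega), fRec_double_add_one m]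
        ring

lemma bu_alt_eq (n : Int) (hn : 0 ≤ n) :
    bu_alt n = (PySem.List.max? ((List.range (n.toNat+1)).map fRec) (fun x => x)).getD 0 := by
  rw [bu_alt, PySem.List.pyRange_one]
  have hlen : (n + 1 - 0).toNat = n.toNat + 1 := by omega
  rw [hlen, List.map_map]
  congr 2
  apply List.map_congr_left
  intro k _
  show fuscGo (0 + (k:Int)) 1 0 = fRec k
  rw [zero_add, fuscGo_eq k 1 0]
  ring

-- ===== VERDICT (by name: the statement is the Claim_ definition above) =====
theorem bu_spec : Claim_equal_bu := by
  intro n _ hpre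
  unfold Spec_bu
  have hn0 : 0 ≤ n := hpre
  by_cases h0 : n = 0
  · subst h0
    rw [bu_alt_eq 0 (by omega)]
    show (0:Int) = _
    simp [List.range_succ, fRec, PySem.List.max?]
  · by_cases h1 : n = 1
    · subst h1
      rw [bu_alt_eq 1 (by omega)]
      show (1:Int) = _
      simp [List.range_succ, fRec, PySem.List.max?]
    · have hn : 2 ≤ n := by omega
      rw [bu_eq n hn, bu_alt_eq n (by omega)]
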